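-- pv_equiv track=rewrite | github.com/nopointttt/milana_tarba | telegram-bot/src/services/analytics/name_number.py | calc_name_number
-- ===== SOURCE A (Python) =====
-- from typing import Dict
--
-- LETTER_TO_NUMBER: Dict[str, int] = {
--     # 1
--     'A': 1, 'I': 1, 'J': 1, 'Q': 1, 'Y': 1,
--     # 2
--     'B': 2, 'K': 2, 'R': 2,
--     # 3
--     'C': 3, 'L': 3, 'S': 3, 'G': 3,
--     # 4
--     'D': 4, 'M': 4, 'T': 4,
--     # 5
--     'E': 5, 'N': 5, 'X': 5,
--     # 6
--     'F': 6, 'O': 6, 'U': 6, 'V': 6,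
--     # 7
--     'P': 7, 'W': 7,
--     # 8
--     'H': 8, 'Z': 8,
--     # 9
-- }
--
-- def _digit_sum(n: int) -> int:
--     """Вернуть сумму цифр числа n."""
--     n = abs(n)
--     s = 0
--     while n:
--         s += n % 10
--         n //= 10
--     return s
--
-- def _reduce_to_single_digit(n: int) -> int:
--     """Свернуть число до однозначного (1..9) повторной суммой цифр."""
--     if n <= 0:
--         raise ValueError("Ожидалось положительное число")
--     while n > 9:
--         n = _digit_sum(n)
--     return n
--
-- def calc_name_number(name: str) -> int:
--     """Рассчитать Число Имени по таблице из «Книги Знаний».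
--
--     Алгоритм:
--     1. Берём имя на латинице
--     2. Каждой букве ставим в соответствие число по таблице
--     3. Суммируем все числа
--     4. Сворачиваем до однозначного числа (1..9)
--
--     :param name: Имя на латинице (например, "Milana")
--     :return: Число Имени (1..9)
--     :raises ValueError: если имя содержит недопустимые символы
--     """
--     if not name or not name.strip():
--         raise ValueError("Имя не может быть пустым")
--
--     name = name.strip().upper()
--     total_sum = 0
--
--     for letter in name:
--         if letter in LETTER_TO_NUMBER:
--             total_sum += LETTER_TO_NUMBER[letter]
--         elif letter == ' ':
--             # Пробелы игнорируем
--             continue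
--         else:
--             raise ValueError(f"Недопустимый символ в имени: '{letter}'. Используйте только латинские буквы.")
--
--     if total_sum == 0:
--         raise ValueError("Имя должно содержать хотя бы одну букву")
--
--     return _reduce_to_single_digit(total_sum)
-- ===== SOURCE B (Python) =====
-- # Same validation and letter table, but the iterative digit-sum reduction is
-- # replaced by the digital-root closed form 1 + (total - 1) % 9.
--
-- _GROUPS = ["AIJQY", "BKR", "CLSG", "DMT", "ENX", "FOUV", "PW", "HZ"]
-- VALUE = {c: i for i, g in enumerate(_GROUPS, start=1) for c in g}
--
-- def calc_name_number(name: str) -> int: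
--     cleaned = name.strip().upper()
--     if not cleaned:
--         raise ValueError("Имя не может быть пустым")
--     bad = next((c for c in cleaned if c != ' ' and c not in VALUE), None)
--     if bad is not None:
--         raise ValueError(f"Недопустимый символ в имени: '{bad}'. Используйте только латинские буквы.")
--     total = sum(VALUE.get(c, 0) for c in cleaned)
--     if total == 0:
--         raise ValueError("Имя должно содержать хотя бы одну букву")
--     return 1 + (total - 1) % 9
-- ===== Notes on version B (the rewrite author's own statement) =====
-- stated objective: idiomatic
-- what changed: The iterative reduction (repeated digit-sum via two helper loops) is replaced by the digital-root closed form 1 + (total - 1) % 9, the invalid-character scan becomes a separate next()/generator pass and the letter sum an idiomatic sum() over a table derived from letter groups.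
import Mathlib
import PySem

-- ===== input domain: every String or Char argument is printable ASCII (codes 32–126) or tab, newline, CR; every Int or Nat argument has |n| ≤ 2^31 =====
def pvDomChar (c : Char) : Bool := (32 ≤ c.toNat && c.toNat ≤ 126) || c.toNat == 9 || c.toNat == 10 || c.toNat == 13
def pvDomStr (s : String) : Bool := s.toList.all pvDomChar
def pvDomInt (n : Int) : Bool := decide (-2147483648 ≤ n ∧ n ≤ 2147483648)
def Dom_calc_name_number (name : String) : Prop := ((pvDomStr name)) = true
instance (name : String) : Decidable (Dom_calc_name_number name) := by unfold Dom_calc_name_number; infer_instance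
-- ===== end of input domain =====

-- B replaces A's iterative repeated-digit-sum reduction by the digital-root
-- closed form 1 + (total - 1) % 9 (same value, no loop over digits).
-- Both Pythons raise ValueError on empty/whitespace-only names and on
-- non-letter, non-space characters; Pre_ excludes exactly those inputs.

-- ===== PORT A =====
def pvLetterTable : PySem.Dict Char Int := PySem.Dict.ofList
  [('A',1),('I',1),('J',1),('Q',1),('Y',1),
   ('B',2),('K',2),('R',2),
   ('C',3),('L',3),('S',3),('G',3),
   ('D',4),('M',4),('T',4),
   ('E',5),('N',5),('X',5),
   ('F',6),('O',6),('U',6),('V',6),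
   ('P',7),('W',7),
   ('H',8),('Z',8)]

-- _digit_sum's while-loop (operates on abs n, which is a Nat)
def pvDigitSumNat (n : Nat) : Nat :=
  if h : n = 0 then 0
  else n % 10 + pvDigitSumNat (n / 10)
decreasing_by exact Nat.div_lt_self (Nat.pos_of_ne_zero h) (by norm_num)

theorem pvDigitSumNat_le (n : Nat) : pvDigitSumNat n ≤ n := by
  induction n using Nat.strong_induction_on with
  | _ n ih =>
    unfold pvDigitSumNat
    split
    · omega
    · have h10 : n / 10 < n := Nat.div_lt_self (by omega) (by norm_num)
      have := ih (n / 10) h10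
      omega

theorem pvDigitSumNat_lt (n : Nat) (h : 9 < n) : pvDigitSumNat n < n := by
  rw [pvDigitSumNat]
  simp only [show ¬ (n = 0) by omega, dite_false]
  have := pvDigitSumNat_le (n / 10)
  omega

-- _reduce_to_single_digit's while-loop (n positive there, so it stays in Nat)
def pvReduceLoop (n : Nat) : Nat :=
  if h : 9 < n then pvReduceLoop (pvDigitSumNat n)
  else n
decreasing_by exact pvDigitSumNat_lt n h

def pvReduce (n : Int) : Int :=
  if n ≤ 0 then 0  -- Python raises ValueError here; unreachable under Pre_
  else (pvReduceLoop n.toNat : Int)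

def calc_name_number (name : String) : Int :=
  -- `if not name or not name.strip(): raise` / strip().upper() / the summing loop
  let cleaned := PySem.Str.upper (PySem.Str.strip name)
  if cleaned.toList = [] then 0  -- ValueError: empty name
  else
    let total :=
      cleaned.toList.foldl (fun acc c =>
        acc.bind (fun s =>
          match pvLetterTable.get? c with
          | some v => some (s + v)
          | none => if c = ' ' then some s else none))  -- none = ValueError: bad char
        (some (0 : Int))
    match total with
    | none => 0
    | some s => if s = 0 then 0  -- ValueError: no letters
                else pvReduce s

-- ===== PORT B =====
def pvGroups : List String := ["AIJQY", "BKR", "CLSG", "DMT", "ENX", "FOUV", "PW", "HZ"]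

-- VALUE lookup: group index + 1, 0 when absent (VALUE.get(c, 0))
def pvVal (c : Char) : Int :=
  match pvGroups.findIdx? (fun g => g.toList.contains c) with
  | some i => (i : Int) + 1
  | none => 0

def calc_name_number_alt (name : String) : Int :=
  let cleaned := PySem.Str.upper (PySem.Str.strip name)
  if cleaned.toList = [] then 0  -- ValueError: empty name
  else match cleaned.toList.find? (fun c => c ≠ ' ' && (pvGroups.findIdx? (fun g => g.toList.contains c)).isNone) with
  | some _ => 0  -- ValueError: bad char
  | none =>
    let total := (cleaned.toList.map pvVal).sum
    if total = 0 then 0  -- ValueError: no letters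
    else 1 + PySem.Int.mod (total - 1) 9

-- ===== PRECONDITION & SPEC =====
-- Excludes exactly the inputs where Python A raises ValueError: names that are
-- empty after stripping, or contain (after strip().upper()) a character other
-- than A–Z and space.
def pvValidChars : List Char :=
  [' ','A','B','C','D','E','F','G','H','I','J','K','L','M',
   'N','O','P','Q','R','S','T','U','V','W','X','Y','Z']

def Pre_calc_name_number (name : String) : Prop :=
  (PySem.Str.upper (PySem.Str.strip name)).toList ≠ [] ∧
  ((PySem.Str.upper (PySem.Str.strip name)).toList.all (fun c => pvValidChars.contains c)) = true
instance (name : String) : Decidable (Pre_calc_name_number name) := by unfold Pre_calc_name_number; infer_instance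

def pvWitness_calc_name_number : String := "Milana"

def Spec_calc_name_number (name : String) (out : Int) : Prop := out = calc_name_number_alt name
instance (name : String) (out : Int) : Decidable (Spec_calc_name_number name out) := by unfold Spec_calc_name_number; infer_instance

-- ===== CLAIM (what is proved, stated in full; the proofs are below) =====
def Claim_equal_calc_name_number : Prop := ∀ (name : String), Dom_calc_name_number name → Pre_calc_name_number name → Spec_calc_name_number name (calc_name_number name)

-- ===== LEMMAS AND PROOFS =====

-- per-character facts, checked over the finite list of admitted characters
set_option maxRecDepth 4096 in
theorem pvChar_facts : ∀ c ∈ pvValidChars,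
    pvLetterTable.get? c = (if c = ' ' then none else some (pvVal c)) ∧
    0 ≤ pvVal c ∧
    (c = ' ' → pvVal c = 0) ∧
    ((c ≠ ' ' && (pvGroups.findIdx? (fun g => g.toList.contains c)).isNone) = false) := by
  intro c hc
  fin_cases hc <;> exact ⟨by decide, by decide, by decide, by decide⟩

theorem pvVal_nonneg_sum (l : List Char) (hl : ∀ c ∈ l, c ∈ pvValidChars) :
    0 ≤ (l.map pvVal).sum := by
  induction l with
  | nil => simp
  | cons c t ih =>
    have h1 := (pvChar_facts c (hl c (List.mem_cons_self))).2.1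
    have h2 := ih (fun x hx => hl x (List.mem_cons_of_mem _ hx))
    simp only [List.map_cons, List.sum_cons]
    omega

theorem pvFold_eq (l : List Char) (hl : ∀ c ∈ l, c ∈ pvValidChars) (s : Int) :
    l.foldl (fun acc c =>
        acc.bind (fun s =>
          match pvLetterTable.get? c with
          | some v => some (s + v)
          | none => if c = ' ' then some s else none)) (some s)
      = some (s + (l.map pvVal).sum) := by
  induction l generalizing s with
  | nil => simp
  | cons c t ih =>
    have hc := pvChar_facts c (hl c (List.mem_cons_self))
    have ht : ∀ x ∈ t, x ∈ pvValidChars := fun x hx => hl x (List.mem_cons_of_mem _ hx)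
    simp only [List.foldl_cons, Option.bind_some, List.map_cons, List.sum_cons]
    by_cases hsp : c = ' '
    · rw [hc.1]
      simp only [hsp, if_true]
      rw [ih ht]
      simp only [show pvVal ' ' = 0 by decide]
      ring_nf
    · rw [hc.1]
      simp only [if_neg hsp]
      rw [ih ht]
      ring_nf

theorem pvFind_none (l : List Char) (hl : ∀ c ∈ l, c ∈ pvValidChars) :
    l.find? (fun c => c ≠ ' ' && (pvGroups.findIdx? (fun g => g.toList.contains c)).isNone) = none := by
  rw [List.find?_eq_none]
  intro c hc hcontra
  have hb := (pvChar_facts c (hl c hc)).2.2.2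
  rw [hb] at hcontra
  exact Bool.false_ne_true hcontra

-- digital root characterisation of A's reduction loop
theorem pvDigitSumNat_mod9 (n : Nat) : pvDigitSumNat n % 9 = n % 9 := by
  induction n using Nat.strong_induction_on with
  | _ n ih =>
    unfold pvDigitSumNat
    split
    · omega
    · rename_i h
      have h10 : n / 10 < n := Nat.div_lt_self (by omega) (by norm_num)
      have := ih (n / 10) h10
      omega

theorem pvDigitSumNat_pos (n : Nat) (h : 0 < n) : 0 < pvDigitSumNat n := by
  induction n using Nat.strong_induction_on with
  | _ n ih =>
    rw [pvDigitSumNat]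
    simp only [show ¬ (n = 0) by omega, dite_false]
    by_cases hm : n % 10 = 0
    · have h10 : n / 10 < n := Nat.div_lt_self (by omega) (by norm_num)
      have hp : 0 < n / 10 := by omega
      have := ih (n / 10) h10 hp
      omega
    · omega

theorem pvReduceLoop_eq (n : Nat) (h : 0 < n) : pvReduceLoop n = 1 + (n - 1) % 9 := by
  induction n using Nat.strong_induction_on with
  | _ n ih =>
    rw [pvReduceLoop]
    split
    · rename_i hgt
      have hlt := pvDigitSumNat_lt n hgt
      have hpos := pvDigitSumNat_pos n (by omega)
      have hmod := pvDigitSumNat_mod9 n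
      rw [ih (pvDigitSumNat n) hlt hpos]
      omega
    · rename_i hle
      omega

theorem pvReduce_eq (s : Int) (h : 1 ≤ s) : pvReduce s = 1 + PySem.Int.mod (s - 1) 9 := by
  unfold pvReduce
  rw [if_neg (by omega)]
  rw [pvReduceLoop_eq s.toNat (by omega)]
  rw [PySem.Int.mod_eq_emod_of_pos (by norm_num : (0:Int) < 9)]
  omega

-- ===== VERDICT (by name: the statement is the Claim_ definition above) =====
set_option maxHeartbeats 2000000 in
theorem calc_name_number_spec : Claim_equal_calc_name_number := by
  intro name _hdom hpre
  obtain ⟨hne, hvalb⟩ := hpre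
  have hval : ∀ c ∈ (PySem.Str.upper (PySem.Str.strip name)).toList, c ∈ pvValidChars := by
    intro c hc
    simpa using List.all_eq_true.mp hvalb c hc
  unfold Spec_calc_name_number calc_name_number calc_name_number_alt
  rw [if_neg hne, if_neg hne, pvFold_eq _ hval 0, pvFind_none _ hval, Int.zero_add]
  dsimp only
  by_cases h0 : (((PySem.Str.upper (PySem.Str.strip name)).toList).map pvVal).sum = 0
  · rw [if_pos h0, if_pos h0]
  · rw [if_neg h0, if_neg h0]
    exact pvReduce_eq _ (by have := pvVal_nonneg_sum _ hval; omega)
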